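-- pv_equiv track=rewrite | github.com/chanakya-botifyy/final_vibho_main | server/ai/resume_parser.py | suggest_matching_jobs
-- ===== SOURCE A (Python) =====
-- def suggest_matching_jobs(skills, experience):
--     """Suggest matching jobs based on skills and experience"""
--     # In production, match against actual job openings
--     # Here we use predefined job titles based on skills and experience
--
--     matching_jobs = []
--
--     # Technical roles
--     tech_skills = ["JavaScript", "React", "Angular", "Node.js", "Python", "Java", "C#", "PHP"]
--     if any(skill in skills for skill in tech_skills):
--         if experience > 5:
--             matching_jobs.append("Senior Software Engineer")
--             matching_jobs.append("Technical Lead")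
--         elif experience > 2:
--             matching_jobs.append("Software Engineer")
--             matching_jobs.append("Full Stack Developer")
--         else:
--             matching_jobs.append("Junior Developer")
--             matching_jobs.append("Software Developer Intern")
--
--     # Data roles
--     data_skills = ["SQL", "MongoDB", "Data Analysis", "Machine Learning", "Power BI", "Tableau"]
--     if any(skill in skills for skill in data_skills):
--         if experience > 5:
--             matching_jobs.append("Data Science Manager")
--             matching_jobs.append("Senior Data Analyst")
--         elif experience > 2:
--             matching_jobs.append("Data Analyst")
--             matching_jobs.append("Business Intelligence Analyst")
--         else:
--             matching_jobs.append("Junior Data Analyst")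
--
--     # Management roles
--     mgmt_skills = ["Project Management", "Agile", "Scrum", "Team Lead", "Management"]
--     if any(skill in skills for skill in mgmt_skills) and experience > 5:
--         matching_jobs.append("Project Manager")
--         matching_jobs.append("Product Manager")
--
--     # If no specific matches, suggest general roles
--     if not matching_jobs:
--         if experience > 5:
--             matching_jobs.append("Senior Professional")
--         elif experience > 2:
--             matching_jobs.append("Mid-level Professional")
--         else:
--             matching_jobs.append("Entry-level Position")
--
--     return matching_jobs[:3]  # Return top 3 matches
-- ===== SOURCE B (Python) =====
-- _CATEGORY = {}
-- for _i, _names in enumerate((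
--         ("JavaScript", "React", "Angular", "Node.js", "Python", "Java", "C#", "PHP"),
--         ("SQL", "MongoDB", "Data Analysis", "Machine Learning", "Power BI", "Tableau"),
--         ("Project Management", "Agile", "Scrum", "Team Lead", "Management"))):
--     for _s in _names:
--         _CATEGORY[_s] = _i
--
-- _TITLES = (
--     (["Junior Developer", "Software Developer Intern"],
--      ["Software Engineer", "Full Stack Developer"],
--      ["Senior Software Engineer", "Technical Lead"]),
--     (["Junior Data Analyst"],
--      ["Data Analyst", "Business Intelligence Analyst"],
--      ["Data Science Manager", "Senior Data Analyst"]),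
--     ([], [], ["Project Manager", "Product Manager"]),
-- )
-- _FALLBACK = (["Entry-level Position"], ["Mid-level Professional"], ["Senior Professional"])
--
--
-- def suggest_matching_jobs(skills, experience):
--     """Suggest matching jobs based on skills and experience (inverted loop:
--     one pass over the candidate's skills through a skill->category index)."""
--     tier = (experience > 2) + (experience > 5)
--     matched = {_CATEGORY[s] for s in skills if s in _CATEGORY}
--     jobs = [t for c in (0, 1, 2) if c in matched for t in _TITLES[c][tier]]
--     return (jobs or _FALLBACK[tier])[:3]
-- ===== Notes on version B (the rewrite author's own statement) =====
-- stated objective: faster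
-- what changed: Inverts the traversal: instead of scanning the candidate's skill list once per category keyword (any(skill in skills ...) per category), B builds one skill->category index dict and makes a single pass over the candidate's skills collecting the set of matched category indices, then emits the per-tier titles of the matched categories (with the same fallback) by comprehension.
import Mathlib
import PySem

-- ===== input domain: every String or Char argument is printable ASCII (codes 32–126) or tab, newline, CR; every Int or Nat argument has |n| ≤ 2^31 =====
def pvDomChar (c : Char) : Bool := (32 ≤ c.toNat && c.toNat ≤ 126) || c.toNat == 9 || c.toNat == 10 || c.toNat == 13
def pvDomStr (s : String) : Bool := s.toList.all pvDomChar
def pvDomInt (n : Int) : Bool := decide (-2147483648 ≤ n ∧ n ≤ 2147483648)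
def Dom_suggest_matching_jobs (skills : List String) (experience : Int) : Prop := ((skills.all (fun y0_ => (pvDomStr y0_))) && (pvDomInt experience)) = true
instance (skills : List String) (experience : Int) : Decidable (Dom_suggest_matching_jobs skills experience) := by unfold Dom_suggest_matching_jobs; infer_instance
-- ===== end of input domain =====

-- B inverts the traversal: one pass over the candidate's skills through a
-- skill->category index dict, instead of A's scan of the skill list once per
-- category keyword; objective: faster (measured), same output.

-- ===== PORT A =====
def suggest_matching_jobs (skills : List String) (experience : Int) : List String :=
  let matching_jobs : List String := []
  let tech_skills : List String := ["JavaScript", "React", "Angular", "Node.js", "Python", "Java", "C#", "PHP"]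
  let matching_jobs :=
    if tech_skills.any (fun skill => skills.contains skill) then
      if experience > 5 then matching_jobs ++ ["Senior Software Engineer"] ++ ["Technical Lead"]
      else if experience > 2 then matching_jobs ++ ["Software Engineer"] ++ ["Full Stack Developer"]
      else matching_jobs ++ ["Junior Developer"] ++ ["Software Developer Intern"]
    else matching_jobs
  let data_skills : List String := ["SQL", "MongoDB", "Data Analysis", "Machine Learning", "Power BI", "Tableau"]
  let matching_jobs :=
    if data_skills.any (fun skill => skills.contains skill) then
      if experience > 5 then matching_jobs ++ ["Data Science Manager"] ++ ["Senior Data Analyst"]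
      else if experience > 2 then matching_jobs ++ ["Data Analyst"] ++ ["Business Intelligence Analyst"]
      else matching_jobs ++ ["Junior Data Analyst"]
    else matching_jobs
  let mgmt_skills : List String := ["Project Management", "Agile", "Scrum", "Team Lead", "Management"]
  let matching_jobs :=
    if mgmt_skills.any (fun skill => skills.contains skill) ∧ experience > 5 then
      matching_jobs ++ ["Project Manager"] ++ ["Product Manager"]
    else matching_jobs
  let matching_jobs :=
    if matching_jobs = [] then
      if experience > 5 then matching_jobs ++ ["Senior Professional"]
      else if experience > 2 then matching_jobs ++ ["Mid-level Professional"]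
      else matching_jobs ++ ["Entry-level Position"]
    else matching_jobs
  matching_jobs.take 3  -- matching_jobs[:3]

-- ===== PORT B =====
-- _CATEGORY: skill -> category index (built once, insertion order as in Source B)
def pvCategory : PySem.Dict String Int :=
  PySem.Dict.ofList
    [("JavaScript", 0), ("React", 0), ("Angular", 0), ("Node.js", 0), ("Python", 0), ("Java", 0), ("C#", 0), ("PHP", 0),
     ("SQL", 1), ("MongoDB", 1), ("Data Analysis", 1), ("Machine Learning", 1), ("Power BI", 1), ("Tableau", 1),
     ("Project Management", 2), ("Agile", 2), ("Scrum", 2), ("Team Lead", 2), ("Management", 2)]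

-- _TITLES[c][tier]
def pvTitles (c : Int) (tier : Int) : List String :=
  if c = 0 then
    if tier = 0 then ["Junior Developer", "Software Developer Intern"]
    else if tier = 1 then ["Software Engineer", "Full Stack Developer"]
    else ["Senior Software Engineer", "Technical Lead"]
  else if c = 1 then
    if tier = 0 then ["Junior Data Analyst"]
    else if tier = 1 then ["Data Analyst", "Business Intelligence Analyst"]
    else ["Data Science Manager", "Senior Data Analyst"]
  else
    if tier = 0 then []
    else if tier = 1 then []
    else ["Project Manager", "Product Manager"]

-- _FALLBACK[tier]
def pvFallback (tier : Int) : List String :=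
  if tier = 0 then ["Entry-level Position"]
  else if tier = 1 then ["Mid-level Professional"]
  else ["Senior Professional"]

def suggest_matching_jobs_alt (skills : List String) (experience : Int) : List String :=
  let tier : Int := (if experience > 2 then 1 else 0) + (if experience > 5 then 1 else 0)
  -- matched = {_CATEGORY[s] for s in skills if s in _CATEGORY}  (only membership is consumed)
  let matched : PySem.Set Int :=
    skills.foldl (fun m s =>
      match pvCategory.get? s with
      | some c => PySem.Set.add m c
      | none => m) PySem.Set.empty
  -- jobs = [t for c in (0,1,2) if c in matched for t in _TITLES[c][tier]]
  let jobs : List String :=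
    ([0, 1, 2] : List Int).flatMap (fun c =>
      if PySem.Set.contains matched c then pvTitles c tier else [])
  (if jobs = [] then pvFallback tier else jobs).take 3

-- ===== PRECONDITION & SPEC =====
def Spec_suggest_matching_jobs (skills : List String) (experience : Int) (out : List String) : Prop := out = suggest_matching_jobs_alt skills experience
instance (skills : List String) (experience : Int) (out : List String) : Decidable (Spec_suggest_matching_jobs skills experience out) := by unfold Spec_suggest_matching_jobs; infer_instance

-- ===== CLAIM (what is proved, stated in full; the proofs are below) =====
def Claim_equal_suggest_matching_jobs : Prop := ∀ (skills : List String) (experience : Int), Dom_suggest_matching_jobs skills experience → Spec_suggest_matching_jobs skills experience (suggest_matching_jobs skills experience)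

-- ===== LEMMAS AND PROOFS =====

-- membership in the fold that builds `matched`
theorem mem_matched_fold (skills : List String) (acc : PySem.Set Int) (c : Int) :
    (c ∈ skills.foldl (fun m s =>
        match pvCategory.get? s with
        | some c' => PySem.Set.add m c'
        | none => m) acc) ↔ c ∈ acc ∨ ∃ s ∈ skills, pvCategory.get? s = some c := by
  induction skills generalizing acc with
  | nil => simp
  | cons x xs ih =>
    simp only [List.foldl_cons, ih]
    cases h : pvCategory.get? x
    · simp [h]
    · simp [PySem.Set.mem_add, h, or_assoc]
      tauto

-- the index dict recovers exactly A's category keyword lists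
theorem cat_eq_zero (s : String) :
    pvCategory.get? s = some 0 ↔
      s ∈ (["JavaScript", "React", "Angular", "Node.js", "Python", "Java", "C#", "PHP"] : List String) := by
  rw [PySem.Dict.get?_eq_some_iff_mem_items _ _ _ (by decide)]
  show (s, (0:Int)) ∈ [("JavaScript", (0:Int)), ("React", 0), ("Angular", 0), ("Node.js", 0), ("Python", 0), ("Java", 0), ("C#", 0), ("PHP", 0),
       ("SQL", 1), ("MongoDB", 1), ("Data Analysis", 1), ("Machine Learning", 1), ("Power BI", 1), ("Tableau", 1),
       ("Project Management", 2), ("Agile", 2), ("Scrum", 2), ("Team Lead", 2), ("Management", 2)] ↔ _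
  simp [Prod.ext_iff]

theorem cat_eq_one (s : String) :
    pvCategory.get? s = some 1 ↔
      s ∈ (["SQL", "MongoDB", "Data Analysis", "Machine Learning", "Power BI", "Tableau"] : List String) := by
  rw [PySem.Dict.get?_eq_some_iff_mem_items _ _ _ (by decide)]
  show (s, (1:Int)) ∈ [("JavaScript", (0:Int)), ("React", 0), ("Angular", 0), ("Node.js", 0), ("Python", 0), ("Java", 0), ("C#", 0), ("PHP", 0),
       ("SQL", 1), ("MongoDB", 1), ("Data Analysis", 1), ("Machine Learning", 1), ("Power BI", 1), ("Tableau", 1),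
       ("Project Management", 2), ("Agile", 2), ("Scrum", 2), ("Team Lead", 2), ("Management", 2)] ↔ _
  simp [Prod.ext_iff]

theorem cat_eq_two (s : String) :
    pvCategory.get? s = some 2 ↔
      s ∈ (["Project Management", "Agile", "Scrum", "Team Lead", "Management"] : List String) := by
  rw [PySem.Dict.get?_eq_some_iff_mem_items _ _ _ (by decide)]
  show (s, (2:Int)) ∈ [("JavaScript", (0:Int)), ("React", 0), ("Angular", 0), ("Node.js", 0), ("Python", 0), ("Java", 0), ("C#", 0), ("PHP", 0),
       ("SQL", 1), ("MongoDB", 1), ("Data Analysis", 1), ("Machine Learning", 1), ("Power BI", 1), ("Tableau", 1),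
       ("Project Management", 2), ("Agile", 2), ("Scrum", 2), ("Team Lead", 2), ("Management", 2)] ↔ _
  simp [Prod.ext_iff]

-- B's matched-set test of category c agrees with A's any-membership scan of its keyword list
theorem matched_eq (skills : List String) (c : Int)
    (cat : List String)
    (hc : ∀ s, pvCategory.get? s = some c ↔ s ∈ cat) :
    PySem.Set.contains (skills.foldl (fun m s =>
        match pvCategory.get? s with
        | some c' => PySem.Set.add m c'
        | none => m) PySem.Set.empty) c =
      cat.any (fun skill => skills.contains skill) := by
  rw [Bool.eq_iff_iff]
  rw [show (PySem.Set.contains _ c = true) ↔ c ∈ (skills.foldl (fun m s =>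
        match pvCategory.get? s with
        | some c' => PySem.Set.add m c'
        | none => m) PySem.Set.empty) by simp [PySem.Set.contains]]
  rw [mem_matched_fold]
  simp only [PySem.Set.empty, List.not_mem_nil, false_or, List.any_eq_true]
  constructor
  · rintro ⟨s, hs, hget⟩
    exact ⟨s, (hc s).1 hget, by simpa using hs⟩
  · rintro ⟨t, ht, hcont⟩
    exact ⟨t, by simpa using hcont, (hc t).2 ht⟩

-- ===== VERDICT (by name: the statement is the Claim_ definition above) =====
set_option maxHeartbeats 1000000 in
theorem suggest_matching_jobs_spec : Claim_equal_suggest_matching_jobs := by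
  intro skills experience _
  unfold Spec_suggest_matching_jobs
  simp only [suggest_matching_jobs, suggest_matching_jobs_alt,
    List.flatMap_cons, List.flatMap_nil, List.append_nil]
  rw [matched_eq skills 0 _ cat_eq_zero, matched_eq skills 1 _ cat_eq_one,
      matched_eq skills 2 _ cat_eq_two]
  generalize (["JavaScript", "React", "Angular", "Node.js", "Python", "Java", "C#", "PHP"] : List String).any (fun skill => skills.contains skill) = t
  generalize (["SQL", "MongoDB", "Data Analysis", "Machine Learning", "Power BI", "Tableau"] : List String).any (fun skill => skills.contains skill) = d
  generalize (["Project Management", "Agile", "Scrum", "Team Lead", "Management"] : List String).any (fun skill => skills.contains skill) = m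
  by_cases he5 : experience > 5 <;> by_cases he2 : experience > 2 <;>
    [skip; (exact absurd (by omega : experience > 2) he2); skip; skip] <;>
  cases t <;> cases d <;> cases m <;>
    simp [he5, he2, pvTitles, pvFallback]
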